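-- pv_equiv track=rewrite | github.com/simothetriangle/jajucha_codes | jajucha_main.py | find_arr_range
-- ===== SOURCE A (Python) =====
-- def find_arr_range(arr, max_ran):
--     arr_s = -1
--     arr_f = -1
--     h = 0
--
--     cnt = 0
--     while cnt < len(arr):
--         if h == 0:
--             if arr[cnt] < max_ran:
--                 arr_s = cnt
--         elif h == 1:
--             if arr[cnt] >= max_ran:
--                 arr_f = cnt
--         cnt += 1
--
--     return arr_s, arr_f
-- ===== SOURCE B (Python) =====
-- def find_arr_range(arr, max_ran):
--     # Reverse scan with early exit: the answer is the LAST index whose value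
--     # is below max_ran, so scanning backwards the first hit is the answer.
--     # (A's arr_f/h machinery is dead code: h never changes, arr_f stays -1.)
--     for i in range(len(arr) - 1, -1, -1):
--         if arr[i] < max_ran:
--             return i, -1
--     return -1, -1
-- ===== Notes on version B (the rewrite author's own statement) =====
-- stated objective: faster
-- what changed: Replaces the forward full pass with dead-code state (h and arr_f never change) by a backward scan that returns the first qualifying index immediately; arr_f is the constant -1.
import Mathlib
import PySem

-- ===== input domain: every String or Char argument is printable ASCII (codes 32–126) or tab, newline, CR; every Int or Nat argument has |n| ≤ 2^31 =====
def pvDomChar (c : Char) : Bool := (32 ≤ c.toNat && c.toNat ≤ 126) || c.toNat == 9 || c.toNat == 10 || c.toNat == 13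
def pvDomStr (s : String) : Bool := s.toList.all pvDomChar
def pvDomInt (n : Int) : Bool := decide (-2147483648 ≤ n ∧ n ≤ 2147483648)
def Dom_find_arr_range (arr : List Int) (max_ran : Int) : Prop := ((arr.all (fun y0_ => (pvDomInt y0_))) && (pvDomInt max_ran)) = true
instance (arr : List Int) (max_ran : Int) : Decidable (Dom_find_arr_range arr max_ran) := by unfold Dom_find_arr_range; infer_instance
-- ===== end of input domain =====

-- B replaces A's forward pass (whose h/arr_f state never changes) by a backward scan
-- returning the first index with arr[i] < max_ran; same return value, simpler code.

-- ===== PORT A =====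
-- the body of A's while loop, over state (arr_s, arr_f, h); cnt ranges over range(len(arr)),
-- so arr[cnt] is in range and List.getD at cnt.toNat is exact
def stepA (arr : List Int) (max_ran : Int) (st : Int × Int × Int) (cnt : Int) : Int × Int × Int :=
  if st.2.2 == 0 then
    (if arr.getD cnt.toNat 0 < max_ran then (cnt, st.2.1, st.2.2) else st)
  else if st.2.2 == 1 then
    (if max_ran ≤ arr.getD cnt.toNat 0 then (st.1, cnt, st.2.2) else st)
  else st

def find_arr_range (arr : List Int) (max_ran : Int) : Int × Int :=
  let st := (PySem.List.pyRange 0 arr.length 1).foldl (stepA arr max_ran) (-1, -1, 0)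
  (st.1, st.2.1)

-- ===== PORT B =====
-- 'for i in range(len(arr)-1, -1, -1)': structural countdown over a Nat index;
-- the index n is always in range, so List.getD n is exact for arr[i]
def altGo (arr : List Int) (max_ran : Int) : Nat → Int × Int
  | 0 => (-1, -1)
  | n + 1 => if arr.getD n 0 < max_ran then ((n : Int), -1) else altGo arr max_ran n

def find_arr_range_alt (arr : List Int) (max_ran : Int) : Int × Int :=
  altGo arr max_ran arr.length

-- ===== PRECONDITION & SPEC =====
def Spec_find_arr_range (arr : List Int) (max_ran : Int) (out : Int × Int) : Prop := out = find_arr_range_alt arr max_ran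
instance (arr : List Int) (max_ran : Int) (out : Int × Int) : Decidable (Spec_find_arr_range arr max_ran out) := by unfold Spec_find_arr_range; infer_instance

-- ===== CLAIM (what is proved, stated in full; the proofs are below) =====
def Claim_equal_find_arr_range : Prop := ∀ (arr : List Int) (max_ran : Int), Dom_find_arr_range arr max_ran → Spec_find_arr_range arr max_ran (find_arr_range arr max_ran)

-- ===== LEMMAS AND PROOFS =====

-- A's h stays 0 and arr_f stays -1 through the whole fold
theorem stepA_preserve (arr : List Int) (m : Int) (L : List Int) :
    ∀ s : Int, (L.foldl (stepA arr m) (s, -1, 0)).2 = (-1, 0) := by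
  induction L with
  | nil => intro s; rfl
  | cons c L ih =>
    intro s
    simp only [List.foldl_cons, stepA]
    norm_num
    split <;> exact ih _

-- stepA only looks at the element at the index, so appending past it changes nothing
theorem foldl_stepA_append (l : List Int) (x m : Int) :
    (PySem.List.pyRange 0 l.length 1).foldl (stepA (l ++ [x]) m) (-1, -1, 0)
      = (PySem.List.pyRange 0 l.length 1).foldl (stepA l m) (-1, -1, 0) := by
  apply PySem.List.foldl_congr_mem
  intro acc c hc
  rw [PySem.List.mem_pyRange_one] at hc
  have hlt : c.toNat < l.length := by omega
  simp [stepA, List.getElem?_append_left hlt]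

theorem altGo_append (l : List Int) (x m : Int) :
    ∀ k, k ≤ l.length → altGo (l ++ [x]) m k = altGo l m k := by
  intro k
  induction k with
  | zero => intro _; rfl
  | succ n ih =>
    intro h
    have hlt : n < l.length := by omega
    simp [altGo, List.getElem?_append_left hlt, ih (by omega)]

theorem find_eq (arr : List Int) (m : Int) :
    find_arr_range arr m = find_arr_range_alt arr m := by
  induction arr using List.reverseRecOn with
  | nil => rfl
  | append_singleton l x ih =>
    have hn : ((l ++ [x]).length : Int) = (l.length : Int) + 1 := by
      simp [List.length_append]
    have hr : PySem.List.pyRange 0 ((l ++ [x]).length : Int) 1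
        = PySem.List.pyRange 0 (l.length : Int) 1 ++ [(l.length : Int)] := by
      rw [hn, PySem.List.pyRange_one_succ_right (by positivity)]
    have hx : (l ++ [x]).getD l.length 0 = x := by
      rw [List.getD_append_right _ _ _ _ (le_refl _)]
      simp
    have hS := stepA_preserve (l ++ [x]) m (PySem.List.pyRange 0 (l.length : Int) 1) (-1)
    rw [foldl_stepA_append] at hS
    unfold find_arr_range at ih ⊢
    unfold find_arr_range_alt at ih ⊢
    simp only [hr, List.foldl_append, List.foldl_cons, List.foldl_nil,
      foldl_stepA_append]
    set S := (PySem.List.pyRange 0 (l.length : Int) 1).foldl (stepA l m) (-1, -1, 0) with hSdef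
    have hS2 : S.2 = (-1, 0) := hS
    have hlen : (l ++ [x]).length = l.length + 1 := by simp
    simp only [hlen, altGo]
    rw [altGo_append l x m l.length (le_refl _)]
    simp only [stepA, hS2, Int.toNat_natCast, hx]
    by_cases hxm : x < m
    · simp [hxm]
    · simp [hxm, ← ih]

-- ===== VERDICT (by name: the statement is the Claim_ definition above) =====
theorem find_arr_range_spec : Claim_equal_find_arr_range := by
  intro arr m _
  unfold Spec_find_arr_range
  exact find_eq arr m
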